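-- pv_equiv track=rewrite | github.com/sublimator/xahaud-scripts | src/xahaud_scripts/utils/coverage_diff.py | _group_lines_with_context
-- ===== SOURCE A (Python) =====
-- def _group_lines_with_context(
--     lines: list[int], context: int, max_line: int
-- ) -> list[tuple[int, int]]:
--     """Group nearby line numbers into (start, end) regions with context.
--
--     Args:
--         lines: Sorted list of line numbers.
--         context: Number of context lines around each region.
--         max_line: Maximum line number in the file.
--
--     Returns:
--         List of (start, end) tuples, 1-indexed inclusive.
--     """
--     if not lines:
--         return []
--
--     regions: list[tuple[int, int]] = []
--     region_start = max(1, lines[0] - context)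
--     region_end = min(max_line, lines[0] + context)
--
--     for line in lines[1:]:
--         new_start = max(1, line - context)
--         new_end = min(max_line, line + context)
--
--         if new_start <= region_end + 1:
--             region_end = new_end
--         else:
--             regions.append((region_start, region_end))
--             region_start = new_start
--             region_end = new_end
--
--     regions.append((region_start, region_end))
--     return regions
-- ===== SOURCE B (Python) =====
-- def _group_lines_with_context(lines, context, max_line):
--     """No merge loop: compute padded starts/ends tables, find the gap
--     boundaries by pairing each start with the PREVIOUS line's end, then zip
--     region starts with region ends."""
--     if not lines:
--         return []
--     starts = [max(1, l - context) for l in lines]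
--     ends = [min(max_line, l + context) for l in lines]
--     gaps = [(s, pe) for s, pe in zip(starts[1:], ends) if s > pe + 1]
--     region_starts = [starts[0]] + [s for s, _ in gaps]
--     region_ends = [pe for _, pe in gaps] + [ends[-1]]
--     return list(zip(region_starts, region_ends))
-- ===== Notes on version B (the rewrite author's own statement) =====
-- stated objective: alternative
-- what changed: A is a stateful single-pass merge with a mutable current region and a final flush append; B has no merge loop at all: it builds padded start/end tables, detects region boundaries by zipping each start with the previous line's padded end, and zips the boundary-derived region-start list with the region-end list.
import Mathlib
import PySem

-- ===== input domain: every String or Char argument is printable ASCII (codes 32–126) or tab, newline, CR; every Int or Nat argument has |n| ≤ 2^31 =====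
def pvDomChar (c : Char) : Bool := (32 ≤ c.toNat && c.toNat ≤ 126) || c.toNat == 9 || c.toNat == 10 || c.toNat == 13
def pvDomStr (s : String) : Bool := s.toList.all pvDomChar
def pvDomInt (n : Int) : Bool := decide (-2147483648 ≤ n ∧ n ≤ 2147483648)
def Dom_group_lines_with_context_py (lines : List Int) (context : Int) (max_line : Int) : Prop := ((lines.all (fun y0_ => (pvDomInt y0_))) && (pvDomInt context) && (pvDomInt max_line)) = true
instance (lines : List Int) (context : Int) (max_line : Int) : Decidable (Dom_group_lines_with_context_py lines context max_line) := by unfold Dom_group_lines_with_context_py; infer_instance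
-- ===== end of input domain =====

-- B replaces A's stateful merge loop by table construction: padded starts/ends,
-- gap boundaries via a zip of each start with the previous end, then a final zip
-- (objective: alternative, same cost).

-- ===== PORT A =====
-- single fused loop: state = (regions so far, region_start, region_end); final flush append
def group_lines_with_context_py (lines : List Int) (context : Int) (max_line : Int) : List (Int × Int) :=
  match lines with
  | [] => []
  | l0 :: rest =>
    let st := rest.foldl
      (fun (st : List (Int × Int) × Int × Int) (line : Int) =>
        let new_start := max 1 (line - context)
        let new_end := min max_line (line + context)
        if new_start ≤ st.2.2 + 1 then (st.1, st.2.1, new_end)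
        else (st.1 ++ [(st.2.1, st.2.2)], new_start, new_end))
      ([], max 1 (l0 - context), min max_line (l0 + context))
    st.1 ++ [(st.2.1, st.2.2)]

-- ===== PORT B =====
-- tables + zips; headD/getLastD are starts[0] / ends[-1] on the nonempty list
def group_lines_with_context_py_alt (lines : List Int) (context : Int) (max_line : Int) : List (Int × Int) :=
  match lines with
  | [] => []
  | _ :: _ =>
    let starts := lines.map (fun l => max 1 (l - context))
    let ends := lines.map (fun l => min max_line (l + context))
    let gaps := ((starts.drop 1).zip ends).filter (fun p => decide (p.1 > p.2 + 1))
    let region_starts := starts.headD 0 :: gaps.map Prod.fst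
    let region_ends := gaps.map Prod.snd ++ [ends.getLastD 0]
    region_starts.zip region_ends

-- ===== PRECONDITION & SPEC =====
def Spec_group_lines_with_context_py (lines : List Int) (context : Int) (max_line : Int) (out : List (Int × Int)) : Prop := out = group_lines_with_context_py_alt lines context max_line
instance (lines : List Int) (context : Int) (max_line : Int) (out : List (Int × Int)) : Decidable (Spec_group_lines_with_context_py lines context max_line out) := by unfold Spec_group_lines_with_context_py; infer_instance

-- ===== CLAIM =====
def Claim_equal_group_lines_with_context_py : Prop := ∀ (lines : List Int) (context : Int) (max_line : Int), Dom_group_lines_with_context_py lines context max_line → Spec_group_lines_with_context_py lines context max_line (group_lines_with_context_py lines context max_line)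

-- ===== LEMMAS AND PROOFS =====

-- invariant: A's fold-then-flush from state (acc, rs, re) equals acc followed by
-- the zip of (rs :: boundary starts) with (boundary previous-ends ++ [last end]),
-- where boundaries pair each padded start with the previous padded end (re first).
theorem glwc_loop_eq (context max_line : Int) :
    ∀ (rest : List Int) (acc : List (Int × Int)) (rs re : Int),
      (let st := rest.foldl
        (fun (st : List (Int × Int) × Int × Int) (line : Int) =>
          let new_start := max 1 (line - context)
          let new_end := min max_line (line + context)
          if new_start ≤ st.2.2 + 1 then (st.1, st.2.1, new_end)
          else (st.1 ++ [(st.2.1, st.2.2)], new_start, new_end))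
        (acc, rs, re)
       st.1 ++ [(st.2.1, st.2.2)]) =
      acc ++
        (rs :: (((rest.map (fun l => max 1 (l - context))).zip
                   (re :: rest.map (fun l => min max_line (l + context)))).filter
                 (fun p => decide (p.1 > p.2 + 1))).map Prod.fst).zip
          ((((rest.map (fun l => max 1 (l - context))).zip
               (re :: rest.map (fun l => min max_line (l + context)))).filter
             (fun p => decide (p.1 > p.2 + 1))).map Prod.snd ++
           [(rest.map (fun l => min max_line (l + context))).getLastD re]) := by
  intro rest
  induction rest with
  | nil => intro acc rs re; simp
  | cons x tl ih =>
    intro acc rs re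
    simp only [List.map_cons, List.zip_cons_cons, List.foldl_cons, List.filter_cons,
      List.getLastD_cons]
    by_cases h : max 1 (x - context) ≤ re + 1
    · have hb : ¬ (max 1 (x - context) > re + 1) := by omega
      simp only [h, if_true, hb, decide_false]
      exact ih acc rs (min max_line (x + context))
    · have hb : max 1 (x - context) > re + 1 := by omega
      simp only [h, if_false, hb, decide_true]
      rw [ih (acc ++ [(rs, re)]) (max 1 (x - context)) (min max_line (x + context))]
      simp [List.zip_cons_cons]

-- ===== VERDICT =====
theorem group_lines_with_context_py_spec : Claim_equal_group_lines_with_context_py := by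
  intro lines context max_line _
  unfold Spec_group_lines_with_context_py group_lines_with_context_py group_lines_with_context_py_alt
  match lines with
  | [] => simp
  | l0 :: rest =>
    simp only [List.map_cons, List.drop_succ_cons, List.drop_zero, List.headD_cons,
      List.getLastD_cons]
    exact glwc_loop_eq context max_line rest [] (max 1 (l0 - context))
      (min max_line (l0 + context))
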